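-- pv_equiv track=rewrite | github.com/vaideesg/omsdk | omsdktest/demo_analytics.py | do_sort_byname
-- ===== SOURCE A (Python) =====
-- def do_sort_byname(name_to_sort):
--     names = sorted(set(name_to_sort))
--     i = 0
--     while i < len(names):
--         for j in range(i+1, len(names)):
--             if names[i] in names[j]:
--                 # move to end!
--                 names.append(names[i])
--                 del names[i]
--                 i = i - 1
--                 break
--         i = i+1
--     return names
-- ===== SOURCE B (Python) =====
-- def do_sort_byname(name_to_sort):
--     names = sorted(set(name_to_sort))
--     # index every distinct substring of every name once: occ[s] = names containing s
--     occ = {}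
--     for y in names:
--         n = len(y)
--         subs = {y[a:b] for a in range(n + 1) for b in range(a, n + 1)}
--         for s in subs:
--             occ.setdefault(s, []).append(y)
--     # proper superstrings of each name, read off the index
--     supers = {x: [y for y in occ.get(x, []) if y != x] for x in names}
--     from collections import deque
--     queue = deque(names)
--     alive = set(names)
--     out = []
--     while queue:
--         x = queue.popleft()
--         if any(y in alive for y in supers[x]):
--             queue.append(x)
--         else:
--             out.append(x)
--             alive.discard(x)
--     return out
-- ===== Notes on version B (the rewrite author's own statement) =====
-- stated objective: faster
-- what changed: A repeatedly rescans the suffix with substring tests while bubbling names to the end by append+delete; B precomputes each name's proper superstrings once, then simulates the same move-to-end process with a deque and a live-name set so every step is a cheap membership check instead of an O(n*L) substring scan.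
import Mathlib
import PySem

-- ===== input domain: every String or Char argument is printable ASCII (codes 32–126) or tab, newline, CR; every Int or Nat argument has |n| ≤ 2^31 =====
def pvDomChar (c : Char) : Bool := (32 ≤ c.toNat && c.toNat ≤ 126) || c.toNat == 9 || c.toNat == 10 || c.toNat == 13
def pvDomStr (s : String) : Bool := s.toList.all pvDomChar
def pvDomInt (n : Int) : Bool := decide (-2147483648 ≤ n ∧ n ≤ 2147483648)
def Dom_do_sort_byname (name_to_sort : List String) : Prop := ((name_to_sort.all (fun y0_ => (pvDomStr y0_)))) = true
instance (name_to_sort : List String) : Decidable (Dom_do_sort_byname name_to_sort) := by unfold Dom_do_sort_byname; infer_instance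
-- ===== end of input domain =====

-- B replaces A's in-place move-to-end bubbling (which rescans later names with substring tests at
-- every step) by a one-time precomputation of each name's proper superstrings plus a queue/live-set
-- simulation; objective: faster (the inner substring scans disappear).

-- ---- termination helpers (cited by the ports' decreasing_by; proved below the claim block is not
-- allowed for these, since the ports need them) ----

/-- `z` has no proper superstring inside `l` (Python's `z in y` substring test). -/
def pvMaxIn (l : List String) (z : String) : Bool :=
  l.all (fun y => !(PySem.Str.isIn z y) || z == y)

/-- Index of the first element of `l` with no proper superstring inside `l`. -/
def pvFirstMax (l : List String) : Nat := l.findIdx (pvMaxIn l)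

theorem pvMaxIn_perm {l l' : List String} (h : l.Perm l') : pvMaxIn l = pvMaxIn l' := by
  funext z; exact h.all_eq

theorem pvExists_longest {l : List String} (h : l ≠ []) :
    ∃ z ∈ l, ∀ y ∈ l, y.toList.length ≤ z.toList.length := by
  induction l with
  | nil => exact absurd rfl h
  | cons a t ih =>
    cases t with
    | nil => exact ⟨a, by simp⟩
    | cons b t' =>
      obtain ⟨z, hz, hmax⟩ := ih (by simp)
      by_cases hc : z.toList.length ≤ a.toList.length
      · exact ⟨a, by simp, by
          intro y hy
          rcases List.mem_cons.1 hy with rfl | hy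
          · exact le_rfl
          · exact le_trans (hmax y hy) hc⟩
      · exact ⟨z, List.mem_cons_of_mem _ hz, by
          intro y hy
          rcases List.mem_cons.1 hy with rfl | hy
          · exact le_of_not_ge hc
          · exact hmax y hy⟩

theorem pvExists_maxIn {l : List String} (h : l ≠ []) : ∃ z ∈ l, pvMaxIn l z = true := by
  obtain ⟨z, hz, hmax⟩ := pvExists_longest h
  refine ⟨z, hz, ?_⟩
  simp only [pvMaxIn, List.all_eq_true]
  intro y hy
  by_cases hin : PySem.Str.isIn z y = true
  · have hinf := (PySem.Str.isIn_iff_infix z y).1 hin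
    have hlen : z.toList.length = y.toList.length :=
      le_antisymm hinf.length_le (hmax y hy)
    have : z.toList = y.toList := hinf.sublist.eq_of_length hlen
    simp [String.toList_inj.1 this]
  · rw [show PySem.Str.isIn z y = false from by simpa [PySem.Str.isIn] using hin]
    simp

theorem pvFindIdx_rot {p : String → Bool} {x : String} {t : List String}
    (hx : p x = false) (hz : ∃ z ∈ t, p z = true) :
    (t ++ [x]).findIdx p < (x :: t).findIdx p := by
  have ht : t.findIdx p < t.length := List.findIdx_lt_length.2 hz
  rw [List.findIdx_append, if_pos ht, List.findIdx_cons, hx]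
  simp only [cond_false]
  omega

theorem pvFirstMax_rot {x : String} {t : List String}
    (hnd : (x :: t).Nodup)
    (hy : t.any (fun y => PySem.Str.isIn x y) = true) :
    pvFirstMax (t ++ [x]) < pvFirstMax (x :: t) := by
  have hperm : (t ++ [x]).Perm (x :: t) := List.perm_append_singleton x t
  unfold pvFirstMax
  rw [pvMaxIn_perm hperm]
  obtain ⟨y, hyt, hyin⟩ := List.any_eq_true.1 hy
  have hxne : x ∉ t := (List.nodup_cons.1 hnd).1
  have hx : pvMaxIn (x :: t) x = false := by
    have hne : (x == y) = false := by
      simp only [beq_eq_false_iff_ne]; rintro rfl; exact hxne hyt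
    refine List.all_eq_false.2 ⟨y, List.mem_cons_of_mem _ hyt, ?_⟩
    rw [hyin, hne]
    simp
  refine pvFindIdx_rot hx ?_
  obtain ⟨z, hz, hzmax⟩ := pvExists_maxIn (l := x :: t) (by simp)
  rcases List.mem_cons.1 hz with rfl | hz
  · rw [hx] at hzmax; exact absurd hzmax (by simp)
  · exact ⟨z, hz, hzmax⟩

theorem pvRot_eq (names : List String) (i : Nat) (h : i < names.length) :
    (names ++ [names[i]]).eraseIdx i = names.take i ++ (names.drop (i + 1) ++ [names[i]]) := by
  rw [List.eraseIdx_append_of_lt_length h, List.eraseIdx_eq_take_drop_succ, List.append_assoc]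

theorem pvRot_perm (names : List String) (i : Nat) (h : i < names.length) :
    ((names ++ [names[i]]).eraseIdx i).Perm names := by
  rw [pvRot_eq names i h]
  have h1 : (names.drop (i + 1) ++ [names[i]]).Perm (names[i] :: names.drop (i + 1)) :=
    List.perm_append_singleton _ _
  have h2 : names.take i ++ (names[i] :: names.drop (i + 1)) = names := by
    rw [← List.drop_eq_getElem_cons h, List.take_append_drop]
  conv_rhs => rw [← h2]
  exact List.Perm.append_left _ h1

theorem pvDecA_next (names : List String) (i : Nat) (h : i < names.length) :
    Prod.Lex (· < ·) (· < ·)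
      (names.length - (i + 1), pvFirstMax (names.drop (i + 1)))
      (names.length - i, pvFirstMax (names.drop i)) := by
  simp only [Prod.lex_def]
  exact Or.inl (by omega)

-- ===== PORT A =====

/-- Python's inner `for j in range(i+1, len(names)): if names[i] in names[j]: … break`:
    does some `j` from `j0` on satisfy the substring test? -/
def findSuperA (names : List String) (x : String) (j : Nat) : Bool :=
  if h : j < names.length then
    if PySem.Str.isIn x names[j] then true
    else findSuperA names x (j + 1)
  else false
termination_by names.length - j

/-- Cited by `loopA`'s termination argument. -/
theorem findSuperA_eq (names : List String) (x : String) (j : Nat) :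
    findSuperA names x j = (names.drop j).any (fun y => PySem.Str.isIn x y) := by
  fun_induction findSuperA names x j with
  | case1 j h hin =>
    rw [List.drop_eq_getElem_cons h]
    simp only [List.any_cons, hin, Bool.true_or]
  | case2 j h hin ih =>
    rw [ih, List.drop_eq_getElem_cons h]
    simp only [List.any_cons, eq_false_of_ne_true hin, Bool.false_or]
  | case3 j h =>
    rw [List.drop_eq_nil_of_le (by omega)]
    simp

theorem pvDecA_rot (names : List String) (i : Nat) (hnd : names.Nodup) (h : i < names.length)
    (hf : findSuperA names names[i] (i + 1) = true) :
    Prod.Lex (· < ·) (· < ·)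
      ((((names ++ [names[i]]).eraseIdx i)).length - i,
        pvFirstMax (((names ++ [names[i]]).eraseIdx i).drop i))
      (names.length - i, pvFirstMax (names.drop i)) := by
  have hlen : ((names ++ [names[i]]).eraseIdx i).length = names.length := by
    rw [List.length_eraseIdx]
    split
    · simp only [List.length_append, List.length_cons, List.length_nil]
      omega
    · rename_i hcon
      exfalso
      apply hcon
      simp only [List.length_append, List.length_cons, List.length_nil]
      omega
  simp only [Prod.lex_def]
  refine Or.inr ⟨by rw [hlen], ?_⟩
  have hdrop : ((names ++ [names[i]]).eraseIdx i).drop i = names.drop (i + 1) ++ [names[i]] := by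
    rw [pvRot_eq names i h]
    exact List.drop_left' (List.length_take_of_le h.le)
  rw [hdrop, List.drop_eq_getElem_cons h]
  refine pvFirstMax_rot ?_ ?_
  · rw [← List.drop_eq_getElem_cons h]
    exact hnd.sublist (List.drop_sublist i names)
  · rw [findSuperA_eq] at hf
    exact hf

/-- A's while loop.  The `Nodup` argument is only a totality witness (the Python loop would not
    terminate on a list with duplicates, but `names = sorted(set(...))` never has any); the
    computation is exactly A's: test, append a copy, delete position `i` (`i` is unchanged because
    `i = i - 1` is immediately followed by `i = i + 1`), else `i = i + 1`. -/
def loopA (names : List String) (i : Nat) (hnd : names.Nodup) : List String :=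
  if h : i < names.length then
    let x := names[i]
    if hf : findSuperA names x (i + 1) then
      loopA ((names ++ [x]).eraseIdx i) i ((pvRot_perm names i h).symm.nodup hnd)
    else
      loopA names (i + 1) hnd
  else names
termination_by (names.length - i, pvFirstMax (names.drop i))
decreasing_by
  · exact pvDecA_rot names i hnd h hf
  · exact pvDecA_next names i h

def do_sort_byname (name_to_sort : List String) : List String :=
  loopA (PySem.List.sorted (PySem.Set.ofList name_to_sort) (fun x => x) false) 0
    ((PySem.List.sorted_perm (PySem.Set.ofList name_to_sort) (fun x => x) false).symm.nodup
      (PySem.Set.nodup_ofList name_to_sort))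

-- ===== PORT B =====

theorem pvDecB_rot (supers : PySem.Dict String (List String)) (alive : PySem.Set String)
    (x : String) (rest : List String)
    (hc : ((supers.getD x []).any (fun y => alive.contains y)) = true)
    (hall : ¬(rest.all (fun z => (supers.getD z []).any (fun y => alive.contains y))) = true) :
    Prod.Lex (· < ·) (· < ·)
      ((rest ++ [x]).length,
        (rest ++ [x]).findIdx (fun z => !((supers.getD z []).any (fun y => alive.contains y))))
      ((x :: rest).length,
        (x :: rest).findIdx (fun z => !((supers.getD z []).any (fun y => alive.contains y)))) := by
  simp only [Prod.lex_def]
  refine Or.inr ⟨by simp, ?_⟩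
  refine pvFindIdx_rot (by simp only [hc, Bool.not_true]) ?_
  obtain ⟨z, hz, hzc⟩ := List.all_eq_false.1 (eq_false_of_ne_true hall)
  exact ⟨z, hz, by simp only [eq_false_of_ne_true hzc, Bool.not_false]⟩

theorem pvDecB_next (supers : PySem.Dict String (List String)) (alive alive' : PySem.Set String)
    (x : String) (rest : List String) :
    Prod.Lex (· < ·) (· < ·)
      (rest.length, rest.findIdx (fun z => !((supers.getD z []).any (fun y => alive'.contains y))))
      ((x :: rest).length,
        (x :: rest).findIdx (fun z => !((supers.getD z []).any (fun y => alive.contains y)))) := by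
  simp only [Prod.lex_def]
  exact Or.inl (by simp)

/-- B's queue loop: pop `x`; if some precomputed superstring of `x` is still alive, requeue `x`,
    otherwise emit it and kill it.  The inner `rest.all …` test is only a totality guard (the
    substring relation is acyclic, so some queued name always has no live superstring; that branch
    is proved unreachable in the equivalence proof below). -/
def loopB (supers : PySem.Dict String (List String)) (out : List String)
    (q : List String) (alive : PySem.Set String) : List String :=
  match q with
  | [] => out
  | x :: rest =>
    if hc : (supers.getD x []).any (fun y => alive.contains y) then
      if hall : rest.all (fun z => (supers.getD z []).any (fun y => alive.contains y)) then
        out ++ x :: rest  -- unreachable totality guard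
      else
        loopB supers out (rest ++ [x]) alive
    else
      loopB supers (out ++ [x]) rest (alive.discard x)
termination_by (q.length, q.findIdx (fun z => !((supers.getD z []).any (fun y => alive.contains y))))
decreasing_by
  · exact pvDecB_rot supers alive x rest hc hall
  · exact pvDecB_next supers alive (alive.discard x) x rest

/-- `{y[a:b] for a in range(len(y)+1) for b in range(a, len(y)+1)}` — every substring of `y`,
    as a Python set. -/
def pvSubs (y : String) : PySem.Set String :=
  PySem.Set.ofList ((PySem.List.pyRange 0 (PySem.Str.len y + 1) 1).flatMap
    (fun a => (PySem.List.pyRange a (PySem.Str.len y + 1) 1).map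
      (fun b => PySem.Str.slice y (some a) (some b))))

/-- The substring index: `occ[s]` lists the names that contain `s`
    (`occ.setdefault(s, []).append(y)` over all substrings `s` of each `y`). -/
def pvOcc (names : List String) : PySem.Dict String (List String) :=
  names.foldl
    (fun d y => (pvSubs y).foldl (fun d s => d.modify s [] (fun l => l ++ [y])) d)
    PySem.Dict.empty

def do_sort_byname_alt (name_to_sort : List String) : List String :=
  let names := PySem.List.sorted (PySem.Set.ofList name_to_sort) (fun x => x) false
  let occ := pvOcc names
  let supers := names.foldl
    (fun d x => d.insert x ((occ.getD x []).filter (fun y => !(y == x))))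
    PySem.Dict.empty
  loopB supers [] names (PySem.Set.ofList names)

-- ===== PRECONDITION & SPEC =====
def Spec_do_sort_byname (name_to_sort : List String) (out : List String) : Prop := out = do_sort_byname_alt name_to_sort
instance (name_to_sort : List String) (out : List String) : Decidable (Spec_do_sort_byname name_to_sort out) := by unfold Spec_do_sort_byname; infer_instance

-- ===== CLAIM (what is proved, stated in full; the proofs are below) =====
def Claim_equal_do_sort_byname : Prop := ∀ (name_to_sort : List String), Dom_do_sort_byname name_to_sort → Spec_do_sort_byname name_to_sort (do_sort_byname name_to_sort)

-- ===== LEMMAS AND PROOFS =====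

theorem pvDecQ_rot (x : String) (t : List String) (hnd : (x :: t).Nodup)
    (hf : t.any (fun y => PySem.Str.isIn x y) = true) :
    Prod.Lex (· < ·) (· < ·)
      ((t ++ [x]).length, pvFirstMax (t ++ [x]))
      ((x :: t).length, pvFirstMax (x :: t)) := by
  simp only [Prod.lex_def]
  exact Or.inr ⟨by simp, pvFirstMax_rot hnd hf⟩

theorem pvDecQ_next (x : String) (t : List String) :
    Prod.Lex (· < ·) (· < ·) (t.length, pvFirstMax t) ((x :: t).length, pvFirstMax (x :: t)) := by
  simp only [Prod.lex_def]
  exact Or.inl (by simp)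

/-- The reference process both loops compute: pop the front name, cycle it to the back while some
    later queued name has it as a substring, else emit it. -/
def loopQ (q : List String) (hnd : q.Nodup) : List String :=
  match q with
  | [] => []
  | x :: t =>
    if hf : t.any (fun y => PySem.Str.isIn x y) then
      loopQ (t ++ [x]) ((List.perm_append_singleton x t).symm.nodup hnd)
    else
      x :: loopQ t (List.Nodup.of_cons hnd)
termination_by (q.length, pvFirstMax q)
decreasing_by
  · exact pvDecQ_rot x t hnd hf
  · exact pvDecQ_next x t

theorem loopQ_nil (h : ([] : List String).Nodup) : loopQ [] h = [] := by
  rw [loopQ]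

theorem loopQ_cons_pos (x : String) (t : List String) (h : (x :: t).Nodup)
    (hf : t.any (fun y => PySem.Str.isIn x y) = true) :
    loopQ (x :: t) h = loopQ (t ++ [x]) ((List.perm_append_singleton x t).symm.nodup h) := by
  rw [loopQ, dif_pos hf]

theorem loopQ_cons_neg (x : String) (t : List String) (h : (x :: t).Nodup)
    (hf : t.any (fun y => PySem.Str.isIn x y) = false) :
    loopQ (x :: t) h = x :: loopQ t h.of_cons := by
  rw [loopQ, dif_neg (by rw [hf]; exact Bool.false_ne_true)]

theorem loopQ_congr {q q' : List String} (e : q = q') (h : q.Nodup) :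
    loopQ q h = loopQ q' (e ▸ h) := by
  subst e; rfl

theorem loopA_eq_loopQ (names : List String) (i : Nat) (hnd : names.Nodup) (hi : i ≤ names.length) :
    loopA names i hnd = names.take i ++ loopQ (names.drop i) (hnd.sublist (List.drop_sublist i names)) := by
  fun_induction loopA names i hnd with
  | case1 names i hnd h x hf ih =>
    have hrot := pvRot_eq names i h
    have hlen : ((names ++ [x]).eraseIdx i).length = names.length := by
      rw [List.length_eraseIdx]
      split
      · simp only [List.length_append, List.length_cons, List.length_nil]
        omega
      · rename_i hcon
        exfalso
        apply hcon
        simp only [List.length_append, List.length_cons, List.length_nil]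
        omega
    rw [ih (by rw [hlen]; omega)]
    have e1 : ((names ++ [x]).eraseIdx i).take i = names.take i := by
      rw [show x = names[i] from rfl, hrot]
      exact List.take_left' (List.length_take_of_le h.le)
    have e2 : ((names ++ [x]).eraseIdx i).drop i = names.drop (i + 1) ++ [x] := by
      rw [show x = names[i] from rfl, hrot]
      exact List.drop_left' (List.length_take_of_le h.le)
    rw [e1, loopQ_congr e2]
    rw [loopQ_congr (List.drop_eq_getElem_cons h) (hnd.sublist (List.drop_sublist i names))]
    rw [loopQ_cons_pos names[i] (names.drop (i + 1)) _ (by rw [findSuperA_eq] at hf; exact hf)]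
  | case2 names i hnd h x hf ih =>
    rw [ih (by omega)]
    rw [loopQ_congr (List.drop_eq_getElem_cons h) (hnd.sublist (List.drop_sublist i names))]
    rw [loopQ_cons_neg names[i] (names.drop (i + 1)) _
      (by rw [findSuperA_eq] at hf; exact eq_false_of_ne_true hf)]
    have ht : names.take (i + 1) = names.take i ++ [names[i]] := by
      rw [List.take_succ, List.getElem?_eq_getElem h]
      rfl
    rw [ht, List.append_assoc]
    rfl
  | case3 names i hnd h =>
    have : i = names.length := by omega
    subst this
    rw [loopQ_congr (List.drop_length) (hnd.sublist (List.drop_sublist names.length names)),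
      loopQ_nil, List.take_length, List.append_nil]

theorem pvCond_iff {all : List String} {supers : PySem.Dict String (List String)}
    (hsup : ∀ x ∈ all, ∀ y, y ∈ supers.getD x [] ↔
      (y ∈ all ∧ y ≠ x ∧ PySem.Str.isIn x y = true))
    {q : List String} {alive : PySem.Set String}
    (hsub : ∀ s ∈ q, s ∈ all) (halive : ∀ s, s ∈ alive ↔ s ∈ q)
    {z : String} (hz : z ∈ all) :
    ((supers.getD z []).any (fun y => alive.contains y)) = true ↔
      ∃ y ∈ q, y ≠ z ∧ PySem.Str.isIn z y = true := by
  simp only [List.any_eq_true, PySem.Set.contains_iff]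
  constructor
  · rintro ⟨y, hy, hyal⟩
    obtain ⟨-, hyne, hyin⟩ := (hsup z hz y).1 hy
    exact ⟨y, (halive y).1 hyal, hyne, hyin⟩
  · rintro ⟨y, hyq, hyne, hyin⟩
    exact ⟨y, (hsup z hz y).2 ⟨hsub y hyq, hyne, hyin⟩, (halive y).2 hyq⟩

theorem loopB_eq_loopQ (all : List String) (supers : PySem.Dict String (List String))
    (hsup : ∀ x ∈ all, ∀ y, y ∈ supers.getD x [] ↔
      (y ∈ all ∧ y ≠ x ∧ PySem.Str.isIn x y = true))
    (out q : List String) (alive : PySem.Set String)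
    (hnd : q.Nodup) (hsub : ∀ s ∈ q, s ∈ all)
    (halive : ∀ s, s ∈ alive ↔ s ∈ q) :
    loopB supers out q alive = out ++ loopQ q hnd := by
  fun_induction loopB supers out q alive with
  | case1 out => rw [loopQ_nil, List.append_nil]
  | case2 out alive x rest hc hall =>
    exfalso
    obtain ⟨z, hz, hzmax⟩ := pvExists_maxIn (l := x :: rest) (by simp)
    have hcz : ((supers.getD z []).any (fun y => alive.contains y)) = true := by
      rcases List.mem_cons.1 hz with rfl | hz'
      · exact hc
      · exact List.all_eq_true.1 hall z hz'
    obtain ⟨y, hyq, hyne, hyin⟩ := (pvCond_iff hsup hsub halive (hsub z hz)).1 hcz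
    have := List.all_eq_true.1 hzmax y hyq
    rw [hyin] at this
    simp only [Bool.not_true, Bool.false_or, beq_iff_eq] at this
    exact hyne this.symm
  | case3 out alive x rest hc hall ih =>
    have hperm := List.perm_append_singleton x rest
    rw [ih (hperm.symm.nodup hnd) (fun s hs => hsub s (hperm.mem_iff.1 hs))
      (fun s => (halive s).trans hperm.mem_iff.symm)]
    have hany : rest.any (fun y => PySem.Str.isIn x y) = true := by
      obtain ⟨y, hyq, hyne, hyin⟩ :=
        (pvCond_iff hsup hsub halive (hsub x List.mem_cons_self)).1 hc
      rcases List.mem_cons.1 hyq with rfl | hyr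
      · exact absurd rfl hyne
      · exact List.any_eq_true.2 ⟨y, hyr, hyin⟩
    rw [loopQ_cons_pos x rest hnd hany]
  | case4 out alive x rest hc ih =>
    have hxrest : x ∉ rest := (List.nodup_cons.1 hnd).1
    rw [ih hnd.of_cons (fun s hs => hsub s (List.mem_cons_of_mem _ hs))
      (fun s => by
        rw [PySem.Set.mem_discard]
        constructor
        · rintro ⟨hs, hne⟩
          rcases List.mem_cons.1 ((halive s).1 hs) with rfl | h'
          · exact absurd rfl hne
          · exact h'
        · intro hs
          exact ⟨(halive s).2 (List.mem_cons_of_mem _ hs), fun e => hxrest (e ▸ hs)⟩)]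
    have hany : rest.any (fun y => PySem.Str.isIn x y) = false := by
      rcases hany2 : rest.any (fun y => PySem.Str.isIn x y) with _ | _
      · rfl
      · exfalso
        obtain ⟨y, hyq, hyin⟩ := List.any_eq_true.1 hany2
        apply hc
        exact (pvCond_iff hsup hsub halive (hsub x List.mem_cons_self)).2
          ⟨y, List.mem_cons_of_mem _ hyq, fun e => hxrest (e ▸ hyq), hyin⟩
    rw [loopQ_cons_neg x rest hnd hany]
    simp

theorem pvMem_subs (x y : String) :
    x ∈ pvSubs y ↔ PySem.Str.isIn x y = true := by
  have hlen : PySem.Str.len y = (y.toList.length : Int) := by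
    simp [PySem.Str.len]
  unfold pvSubs
  rw [PySem.Set.mem_ofList]
  simp only [List.mem_flatMap, List.mem_map]
  constructor
  · rintro ⟨a, ha, b, hb, rfl⟩
    rw [PySem.List.mem_pyRange_iff_of_pos one_pos] at ha hb
    obtain ⟨ha0, -, -⟩ := ha
    obtain ⟨hab, -, -⟩ := hb
    obtain ⟨a, rfl⟩ := Int.eq_ofNat_of_zero_le ha0
    obtain ⟨b, rfl⟩ := Int.eq_ofNat_of_zero_le (le_trans ha0 hab)
    rw [PySem.Str.isIn_iff_infix, PySem.Str.toList_slice]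
    show PySem.List.slice y.toList (some (a : Int)) (some (b : Int)) <:+: y.toList
    rw [PySem.List.slice_natCast]
    exact (List.take_prefix _ _).isInfix.trans (List.drop_suffix _ _).isInfix
  · intro hin
    have hin' : PySem.Chars.isIn x.toList y.toList = true := by
      simpa [PySem.Str.isIn] using hin
    obtain ⟨j, hpre⟩ := (PySem.Chars.exists_prefix_drop_iff_isIn x.toList y.toList).2 hin'
    by_cases hj : j ≤ y.toList.length
    · have hxl : x.toList.length ≤ y.toList.length - j := by
        have := hpre.length_le
        rw [List.length_drop] at this
        omega
      refine ⟨(j : Int), ?_, ((j + x.toList.length : Nat) : Int), ?_, ?_⟩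
      · rw [PySem.List.mem_pyRange_iff_of_pos one_pos, hlen]
        refine ⟨by positivity, by push_cast; omega, one_dvd _⟩
      · rw [PySem.List.mem_pyRange_iff_of_pos one_pos, hlen]
        refine ⟨by push_cast; omega, by push_cast; omega, one_dvd _⟩
      · rw [← String.toList_inj, PySem.Str.toList_slice]
        show PySem.List.slice y.toList (some ((j : Nat) : Int)) (some ((j + x.toList.length : Nat) : Int)) = x.toList
        rw [PySem.List.slice_natCast]
        have := List.prefix_iff_eq_take.1 hpre
        rw [show j + x.toList.length - j = x.toList.length by omega]
        exact this.symm
    · have hd : y.toList.drop j = [] := List.drop_eq_nil_of_le (by omega)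
      have hx : x.toList = [] := List.prefix_nil.1 (hd ▸ hpre)
      refine ⟨(0 : Int), ?_, (0 : Int), ?_, ?_⟩
      · rw [PySem.List.mem_pyRange_iff_of_pos one_pos, hlen]
        refine ⟨le_refl _, by positivity, one_dvd _⟩
      · rw [PySem.List.mem_pyRange_iff_of_pos one_pos, hlen]
        refine ⟨le_refl _, by positivity, one_dvd _⟩
      · rw [← String.toList_inj, PySem.Str.toList_slice]
        show PySem.List.slice y.toList (some ((0 : Nat) : Int)) (some ((0 : Nat) : Int)) = x.toList
        rw [PySem.List.slice_natCast, hx]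
        simp

theorem pvMem_tag (y t y' : String) (l : List String) :
    y' ∈ ((l.filter (fun s => s == t)).map (fun _ => y)) ↔ (t ∈ l ∧ y' = y) := by
  simp only [List.mem_map, List.mem_filter, beq_iff_eq]
  constructor
  · rintro ⟨s, ⟨hs, rfl⟩, rfl⟩
    exact ⟨hs, rfl⟩
  · rintro ⟨ht, rfl⟩
    exact ⟨t, ⟨ht, rfl⟩, rfl⟩

theorem pvMem_occ_aux (names : List String) (d : PySem.Dict String (List String))
    (t y' : String) :
    y' ∈ ((names.foldl
        (fun d y => (pvSubs y).foldl (fun d s => d.modify s [] (fun l => l ++ [y])) d)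
        d).getD t []) ↔
      y' ∈ d.getD t [] ∨ (y' ∈ names ∧ t ∈ pvSubs y') := by
  induction names generalizing d with
  | nil => simp
  | cons y rest ih =>
    rw [List.foldl_cons, ih]
    have hstep : (pvSubs y).foldl (fun d s => d.modify s [] (fun l => l ++ [y])) d =
        ((pvSubs y).map (fun s => (s, y))).foldl
          (fun d p => d.modify p.1 [] (fun l => l ++ [p.2])) d := by
      rw [List.foldl_map]
    rw [hstep, PySem.Dict.getD_foldl_modify_append, List.filter_map]
    have hcomp : ((fun p : String × String => p.1 == t) ∘ (fun s => (s, y))) =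
        fun s => s == t := rfl
    have hcomp2 : ((fun p : String × String => p.2) ∘ (fun s => (s, y))) =
        (fun _ => y : String → String) := rfl
    rw [hcomp, List.map_map, hcomp2, List.mem_append, pvMem_tag]
    simp only [List.mem_cons]
    constructor
    · rintro ((h | ⟨hts, rfl⟩) | ⟨hr, hts⟩)
      · exact Or.inl h
      · exact Or.inr ⟨Or.inl rfl, hts⟩
      · exact Or.inr ⟨Or.inr hr, hts⟩
    · rintro (h | ⟨rfl | hr, hts⟩)
      · exact Or.inl (Or.inl h)
      · exact Or.inl (Or.inr ⟨hts, rfl⟩)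
      · exact Or.inr ⟨hr, hts⟩

theorem pvMem_occ (names : List String) (t y' : String) :
    y' ∈ (pvOcc names).getD t [] ↔ y' ∈ names ∧ t ∈ pvSubs y' := by
  unfold pvOcc
  rw [pvMem_occ_aux]
  simp

theorem pvGetD_foldl_insert (f : String → List String) (names : List String)
    (hnd : names.Nodup) (x : String) (hx : x ∈ names) :
    (names.foldl (fun d z => d.insert z (f z)) PySem.Dict.empty).getD x [] = f x := by
  have hitems := PySem.Dict.items_foldl_insert_fresh names (fun z => z) f PySem.Dict.empty
    (fun a _ => PySem.Dict.contains_empty a) (by simpa using hnd)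
  have hkeys : (names.foldl (fun d z => d.insert z (f z)) PySem.Dict.empty).keys.Nodup := by
    rw [PySem.Dict.keys_foldl_insert]
    exact PySem.Set.nodup_update _ _ (by simp [PySem.Dict.keys_empty])
  have hmem : (x, f x) ∈ (names.foldl (fun d z => d.insert z (f z)) PySem.Dict.empty).items := by
    rw [hitems]
    refine List.mem_append_right _ ?_
    exact List.mem_map.2 ⟨x, hx, rfl⟩
  have hget := PySem.Dict.get?_of_mem_items _ hmem hkeys
  exact PySem.Dict.getD_of_get?_eq_some _ [] hget

-- ===== VERDICT (by name: the statement is the Claim_ definition above) =====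
theorem do_sort_byname_spec : Claim_equal_do_sort_byname := by
  intro nts _
  unfold Spec_do_sort_byname do_sort_byname do_sort_byname_alt
  have hnd : (PySem.List.sorted (PySem.Set.ofList nts) (fun x => x) false).Nodup :=
    (PySem.List.sorted_perm (PySem.Set.ofList nts) (fun x => x) false).symm.nodup
      (PySem.Set.nodup_ofList nts)
  rw [loopA_eq_loopQ _ 0 _ (Nat.zero_le _)]
  rw [loopB_eq_loopQ (PySem.List.sorted (PySem.Set.ofList nts) (fun x => x) false) _
    (fun x hx y => by
      rw [pvGetD_foldl_insert
        (fun x => (((pvOcc (PySem.List.sorted (PySem.Set.ofList nts) (fun x => x) false)).getD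
          x []).filter (fun y => !(y == x)))) _ hnd x hx]
      simp only [List.mem_filter, Bool.not_eq_true', beq_eq_false_iff_ne]
      rw [pvMem_occ, pvMem_subs]
      tauto) [] _ _ hnd (fun s hs => hs)
    (fun s => PySem.Set.mem_ofList _ _)]
  rw [List.take_zero, List.nil_append, List.nil_append]
  exact loopQ_congr List.drop_zero _
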